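-- pv_equiv track=rewrite | github.com/Taraxacus/pmd | tiles.py | turn_vicinity
-- ===== SOURCE A (Python) =====
-- def turn_vicinity(vicinity,direction):
--     if direction == "w":
--         return vicinity
--     elif direction == "a":
--         return ["".join([vicinity[i][2-j] for i in range(3)]) for j in range(3)]
--     elif direction == "s":
--         return ["".join([vicinity[2-j][2-i] for i in range(3)]) for j in range(3)]
--     elif direction == "d":
--         return ["".join([vicinity[2-i][j] for i in range(3)]) for j in range(3)]
-- ===== SOURCE B (Python) =====
-- def turn_vicinity(vicinity, direction):
--     turns = {"w": 0, "d": 1, "s": 2, "a": 3}.get(direction)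
--     if turns is None:
--         return None
--     result = vicinity
--     for _ in range(turns):
--         result = _rotate_cw(result)
--     return result
--
--
-- def _rotate_cw(grid):
--     return ["".join(grid[2 - i][j] for i in range(3)) for j in range(3)]
-- ===== Notes on version B (the rewrite author's own statement) =====
-- stated objective: simpler
-- what changed: B replaces A's four hand-written index formulas (one per direction) by a single 90-degree clockwise rotation primitive applied n times, with n looked up in a direction-to-quarter-turns table (w:0, d:1, s:2, a:3), returning None when the direction is absent.
import Mathlib
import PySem

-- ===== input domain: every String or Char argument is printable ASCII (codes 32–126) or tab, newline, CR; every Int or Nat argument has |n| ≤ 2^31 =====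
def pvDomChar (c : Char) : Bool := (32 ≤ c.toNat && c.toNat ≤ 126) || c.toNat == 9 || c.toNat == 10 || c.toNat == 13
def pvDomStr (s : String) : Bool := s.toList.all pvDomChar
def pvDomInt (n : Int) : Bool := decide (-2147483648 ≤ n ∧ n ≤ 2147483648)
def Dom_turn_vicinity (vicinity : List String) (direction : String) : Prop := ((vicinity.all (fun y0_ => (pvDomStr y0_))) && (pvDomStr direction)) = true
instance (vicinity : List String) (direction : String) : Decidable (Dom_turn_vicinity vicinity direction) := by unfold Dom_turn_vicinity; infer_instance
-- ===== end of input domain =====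

-- B replaces A's four hand-written branch formulas by one 90° rotation primitive applied
-- 0/1/2/3 times per a direction→count table (objective: simpler decomposition, same cost).

-- ===== PORT A =====
-- vicinity[i][k]; exact inside Pre_turn_vicinity (both indices are in range there)
def pvCellA (v : List String) (i k : Int) : Char :=
  PySem.List.pyGetD (PySem.List.pyGetD v i "").toList k ' '

def turn_vicinity (vicinity : List String) (direction : String) : Option (List String) :=
  if direction = "w" then some vicinity
  else if direction = "a" then
    some ((PySem.List.pyRange 0 3 1).map (fun j =>
      String.ofList ((PySem.List.pyRange 0 3 1).map (fun i => pvCellA vicinity i (2 - j)))))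
  else if direction = "s" then
    some ((PySem.List.pyRange 0 3 1).map (fun j =>
      String.ofList ((PySem.List.pyRange 0 3 1).map (fun i => pvCellA vicinity (2 - j) (2 - i)))))
  else if direction = "d" then
    some ((PySem.List.pyRange 0 3 1).map (fun j =>
      String.ofList ((PySem.List.pyRange 0 3 1).map (fun i => pvCellA vicinity (2 - i) j))))
  else none

-- ===== PORT B =====
-- grid[i][k]; exact inside Pre_turn_vicinity
def pvCellB (g : List String) (i k : Int) : Char :=
  PySem.List.pyGetD (PySem.List.pyGetD g i "").toList k ' '

-- one clockwise quarter turn of the 3x3 grid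
def pvRotateCW (g : List String) : List String :=
  (PySem.List.pyRange 0 3 1).map (fun j =>
    String.ofList ((PySem.List.pyRange 0 3 1).map (fun i => pvCellB g (2 - i) j)))

def turn_vicinity_alt (vicinity : List String) (direction : String) : Option (List String) :=
  match (PySem.Dict.ofList [("w", (0 : Int)), ("d", 1), ("s", 2), ("a", 3)]).get? direction with
  | none => none
  | some n => some ((PySem.List.pyRange 0 n 1).foldl (fun acc _ => pvRotateCW acc) vicinity)

-- ===== PRECONDITION & SPEC =====
-- Pre_ excludes exactly the inputs where Python A raises IndexError: a rotating direction
-- ("a"/"s"/"d") with fewer than 3 rows, or one of the first 3 rows shorter than 3 chars.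
def Pre_turn_vicinity (vicinity : List String) (direction : String) : Prop :=
  (direction = "a" ∨ direction = "s" ∨ direction = "d") →
    (3 ≤ vicinity.length ∧ ∀ r ∈ vicinity.take 3, 3 ≤ r.toList.length)
instance (vicinity : List String) (direction : String) : Decidable (Pre_turn_vicinity vicinity direction) := by unfold Pre_turn_vicinity; infer_instance

def pvWitness_turn_vicinity : List String × String := (["abc", "def", "ghi"], "a")

def Spec_turn_vicinity (vicinity : List String) (direction : String) (out : Option (List String)) : Prop := out = turn_vicinity_alt vicinity direction
instance (vicinity : List String) (direction : String) (out : Option (List String)) : Decidable (Spec_turn_vicinity vicinity direction out) := by unfold Spec_turn_vicinity; infer_instance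

-- ===== CLAIM (what is proved, stated in full; the proofs are below) =====
def Claim_equal_turn_vicinity : Prop := ∀ (vicinity : List String) (direction : String), Dom_turn_vicinity vicinity direction → Pre_turn_vicinity vicinity direction → Spec_turn_vicinity vicinity direction (turn_vicinity vicinity direction)

-- ===== LEMMAS AND PROOFS =====

theorem pyRange3 : PySem.List.pyRange 0 3 1 = [0, 1, 2] := by decide
theorem pyRange2 : PySem.List.pyRange 0 2 1 = [0, 1] := by decide
theorem pyRange1 : PySem.List.pyRange 0 1 1 = [0] := by decide

theorem dictLit_eq :
    PySem.Dict.ofList [("w", (0 : Int)), ("d", 1), ("s", 2), ("a", 3)] =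
      PySem.Dict.mk [("w", 0), ("d", 1), ("s", 2), ("a", 3)] := by decide

theorem rotCW_def (g : List String) :
    pvRotateCW g =
      [String.ofList [pvCellB g 2 0, pvCellB g 1 0, pvCellB g 0 0],
       String.ofList [pvCellB g 2 1, pvCellB g 1 1, pvCellB g 0 1],
       String.ofList [pvCellB g 2 2, pvCellB g 1 2, pvCellB g 0 2]] := by
  simp [pvRotateCW, pyRange3]

-- ===== VERDICT (by name: the statement is the Claim_ definition above) =====
theorem turn_vicinity_spec : Claim_equal_turn_vicinity := by
  intro v d _ _
  unfold Spec_turn_vicinity turn_vicinity turn_vicinity_alt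
  rw [dictLit_eq]
  by_cases hw : d = "w"
  · subst hw
    simp [PySem.Dict.get?_mk_cons, PySem.List.pyRange]
  by_cases ha : d = "a"
  · subst ha
    rw [if_neg hw, if_pos rfl,
      show (PySem.Dict.mk [("w", (0 : Int)), ("d", 1), ("s", 2), ("a", 3)]).get? "a" = some 3 from by decide]
    simp only [pyRange3, List.foldl_cons, List.foldl_nil, List.map_cons, List.map_nil]
    simp only [rotCW_def]
    simp [pvCellA, pvCellB, PySem.List.pyGetD_ofNat']
  by_cases hs : d = "s"
  · subst hs
    rw [if_neg hw, if_neg ha, if_pos rfl,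
      show (PySem.Dict.mk [("w", (0 : Int)), ("d", 1), ("s", 2), ("a", 3)]).get? "s" = some 2 from by decide]
    simp only [pyRange3, pyRange2, List.foldl_cons, List.foldl_nil, List.map_cons, List.map_nil]
    simp only [rotCW_def]
    simp [pvCellA, pvCellB, PySem.List.pyGetD_ofNat']
  by_cases hd : d = "d"
  · subst hd
    rw [if_neg hw, if_neg ha, if_neg hs, if_pos rfl,
      show (PySem.Dict.mk [("w", (0 : Int)), ("d", 1), ("s", 2), ("a", 3)]).get? "d" = some 1 from by decide]
    simp only [pyRange3, pyRange1, List.foldl_cons, List.foldl_nil, List.map_cons, List.map_nil]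
    simp only [rotCW_def]
    simp [pvCellA, pvCellB, PySem.List.pyGetD_ofNat']
  · have h1 : ("w" == d) = false := by simp [Ne.symm hw]
    have h2 : ("d" == d) = false := by simp [Ne.symm hd]
    have h3 : ("s" == d) = false := by simp [Ne.symm hs]
    have h4 : ("a" == d) = false := by simp [Ne.symm ha]
    simp [PySem.Dict.get?, List.find?, hw, ha, hs, hd, h1, h2, h3, h4]
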